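-- pv_equiv track=rewrite | github.com/leejinbaek/code_solving | programers/level0/최빈값 구하기.py | solution
-- ===== SOURCE A (Python) =====
-- from collections import Counter
--
-- def solution(array):
--         count = Counter(array) #Counter은 배열 값의 빈도수를 구해줌 dict형태로
--         max_count = max(count.values())
--         arr = [key for key, value in count.items() if max_count == value]
--         if len(arr) > 1:
--             return -1
--         else:
--             return arr[0]
-- ===== SOURCE B (Python) =====
-- def solution(array):
--     best_len = cur = 0
--     best_val = -1
--     tie = False
--     prev = None
--     for x in sorted(array):
--         cur = cur + 1 if x == prev else 1
--         prev = x
--         if cur > best_len: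
--             best_len, best_val, tie = cur, x, False
--         elif cur == best_len and x != best_val:
--             tie = True
--     return -1 if tie else best_val
-- ===== Notes on version B (the rewrite author's own statement) =====
-- stated objective: alternative
-- what changed: Replaces the Counter/hash-map frequency table and max-filter passes with a sort followed by a single run-length scan that tracks the best run, its value, and a tie flag.
import Mathlib
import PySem

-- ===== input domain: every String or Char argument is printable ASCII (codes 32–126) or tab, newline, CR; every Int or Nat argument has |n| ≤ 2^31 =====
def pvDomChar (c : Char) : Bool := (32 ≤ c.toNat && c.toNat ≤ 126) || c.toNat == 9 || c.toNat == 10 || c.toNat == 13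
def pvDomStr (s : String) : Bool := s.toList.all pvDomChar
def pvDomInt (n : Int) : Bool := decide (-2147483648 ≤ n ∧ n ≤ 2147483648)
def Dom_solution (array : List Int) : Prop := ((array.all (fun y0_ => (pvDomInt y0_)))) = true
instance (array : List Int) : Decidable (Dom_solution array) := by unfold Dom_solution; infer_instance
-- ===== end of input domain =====

-- B replaces the Counter frequency table and max/filter passes by sort + one run-length scan (alternative algorithm, not claimed faster).

-- ===== PORT A =====
def solution (array : List Int) : Int :=
  let count := PySem.Dict.counter array
  match PySem.List.max? (PySem.Dict.values count) (fun v => v) with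
  | none => 0  -- unreachable under Pre_: Python max() raises ValueError on an empty array
  | some max_count =>
    let arr := (count.items.filter (fun kv => max_count == kv.2)).map (fun kv => kv.1)
    if 1 < arr.length then -1
    else (PySem.List.pyGet? arr 0).getD 0  -- arr[0]; arr is nonempty since the max is attained, so getD's default is unreachable

-- ===== PORT B =====
-- state = (best_len, best_val, tie, cur, prev)
def stepB (st : Int × Int × Bool × Int × Option Int) (x : Int) : Int × Int × Bool × Int × Option Int :=
  let cur := if some x == st.2.2.2.2 then st.2.2.2.1 + 1 else 1
  if st.1 < cur then (cur, x, false, cur, some x)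
  else if cur = st.1 ∧ x ≠ st.2.1 then (st.1, st.2.1, true, cur, some x)
  else (st.1, st.2.1, st.2.2.1, cur, some x)

def solution_alt (array : List Int) : Int :=
  let st := (PySem.List.sorted array (fun x => x) false).foldl stepB (0, -1, false, 0, none)
  if st.2.2.1 = true then -1 else st.2.1

-- ===== PRECONDITION & SPEC =====
-- Pre_ excludes only the empty list, on which Python A raises ValueError (max() of an empty sequence).
def Pre_solution (array : List Int) : Prop := array ≠ []
instance (array : List Int) : Decidable (Pre_solution array) := by unfold Pre_solution; infer_instance
def pvWitness_solution : List Int := ([1])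
def Spec_solution (array : List Int) (out : Int) : Prop := out = solution_alt array
instance (array : List Int) (out : Int) : Decidable (Spec_solution array out) := by unfold Spec_solution; infer_instance

-- ===== CLAIM (what is proved, stated in full; the proofs are below) =====
def Claim_equal_solution : Prop := ∀ (array : List Int), Dom_solution array → Pre_solution array → Spec_solution array (solution array)

-- ===== LEMMAS AND PROOFS =====

-- maximal multiplicity of xs (0 on [])
def Mn (xs : List Int) : Nat := xs.foldl (fun m v => max m (xs.count v)) 0
-- the distinct values of maximal multiplicity, in first-occurrence order
def attL (xs : List Int) : List Int :=
  (PySem.List.dedup xs).filter (fun v => xs.count v == Mn xs)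

theorem foldl_max_le {f : Int → Nat} : ∀ (l : List Int) (a : Nat), a ≤ l.foldl (fun m v => max m (f v)) a := by
  intro l
  induction l with
  | nil => intro a; simp
  | cons x t ih =>
    intro a
    exact le_trans (le_max_left a (f x)) (ih (max a (f x)))

theorem foldl_max_ge {f : Int → Nat} : ∀ (l : List Int) (a : Nat) (v : Int), v ∈ l → f v ≤ l.foldl (fun m v => max m (f v)) a := by
  intro l
  induction l with
  | nil => intro a v hv; simp at hv
  | cons x t ih =>
    intro a v hv
    rcases List.mem_cons.mp hv with h | h
    · subst h
      exact le_trans (le_max_right a (f v)) (foldl_max_le t (max a (f v)))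
    · exact ih (max a (f x)) v h

theorem foldl_max_cases {f : Int → Nat} : ∀ (l : List Int) (a : Nat),
    l.foldl (fun m v => max m (f v)) a = a ∨ ∃ v ∈ l, l.foldl (fun m v => max m (f v)) a = f v := by
  intro l
  induction l with
  | nil => intro a; left; rfl
  | cons x t ih =>
    intro a
    rcases ih (max a (f x)) with h | ⟨v, hv, h⟩
    · rcases max_choice a (f x) with hm | hm
      · left; simpa [hm] using h
      · right; exact ⟨x, List.mem_cons_self .., by simpa [hm] using h⟩
    · right; exact ⟨v, List.mem_cons_of_mem _ hv, h⟩

theorem count_le_Mn {xs : List Int} {v : Int} (h : v ∈ xs) : xs.count v ≤ Mn xs := by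
  unfold Mn; exact foldl_max_ge (f := fun w => xs.count w) xs 0 v h

theorem Mn_attained {xs : List Int} (h : xs ≠ []) : ∃ v ∈ xs, xs.count v = Mn xs := by
  rcases foldl_max_cases (f := fun v => xs.count v) xs 0 with h0 | ⟨v, hv, heq⟩
  · obtain ⟨w, hw⟩ := List.exists_mem_of_ne_nil xs h
    have h1 : 1 ≤ xs.count w := List.count_pos_iff.mpr hw
    have h2 : xs.count w ≤ Mn xs := count_le_Mn hw
    unfold Mn at h2
    omega
  · exact ⟨v, hv, (by unfold Mn; exact heq.symm)⟩

theorem Mn_unique {xs : List Int} {m : Nat} (h1 : ∀ v ∈ xs, xs.count v ≤ m)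
    (h2 : ∃ v ∈ xs, xs.count v = m) : Mn xs = m := by
  obtain ⟨v, hv, hveq⟩ := h2
  have hne : xs ≠ [] := by intro h; subst h; simp at hv
  obtain ⟨w, hw, hweq⟩ := Mn_attained hne
  have := h1 w hw
  have := count_le_Mn hv
  omega

theorem Mn_perm {xs ys : List Int} (h : xs.Perm ys) : Mn xs = Mn ys := by
  rcases eq_or_ne xs [] with hnil | hne
  · subst hnil
    rw [h.nil_eq]
  · apply Mn_unique
    · intro v hv
      rw [h.count_eq]
      exact count_le_Mn (h.mem_iff.mp hv)
    · obtain ⟨v, hv, hveq⟩ := Mn_attained (fun hy => hne (List.perm_nil.mp (hy ▸ h)))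
      exact ⟨v, h.mem_iff.mpr hv, by rw [h.count_eq]; exact hveq⟩

-- invariant of B's scan after processing a (nonempty, sorted) prefix p
def ScanInv (p : List Int) (st : Int × Int × Bool × Int × Option Int) : Prop :=
  ∃ l, p.getLast? = some l ∧
    st.1 = (Mn p : Int) ∧
    st.2.1 ∈ p ∧ p.count st.2.1 = Mn p ∧ (∀ y ∈ p, p.count y = Mn p → st.2.1 ≤ y) ∧
    st.2.2.1 = decide (2 ≤ (attL p).length) ∧
    st.2.2.2.1 = (p.count l : Int) ∧
    st.2.2.2.2 = some l

theorem attL_len (xs : List Int) :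
    (attL xs).length = (PySem.List.dedup xs).countP (fun v => xs.count v == Mn xs) :=
  List.countP_eq_length_filter.symm

theorem mem_attL {xs : List Int} {v : Int} :
    v ∈ attL xs ↔ v ∈ xs ∧ xs.count v = Mn xs := by
  unfold attL
  rw [List.mem_filter, PySem.List.mem_dedup, beq_iff_eq]

theorem le_getLast (p : List Int) (hp : p.Pairwise (· ≤ ·)) {l : Int} (hl : p.getLast? = some l) :
    ∀ y ∈ p, y ≤ l := by
  induction p with
  | nil => simp at hl
  | cons a t ih =>
    match t, hl with
    | [], hl =>
      intro y hy
      simp at hl hy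
      omega
    | b :: t', hl =>
      have hl' : (b :: t').getLast? = some l := by
        rw [List.getLast?_cons_cons] at hl
        exact hl
      have hpa := List.pairwise_cons.mp hp
      intro y hy
      rcases List.mem_cons.mp hy with rfl | hy'
      · exact le_trans (hpa.1 l (List.mem_of_getLast? hl')) (le_refl l)
      · exact ih hpa.2 hl' y hy'

theorem countP_one_of (l : List Int) (hnd : l.Nodup) {x : Int} (hx : x ∈ l) {p : Int → Bool}
    (h : ∀ y ∈ l, p y = true ↔ y = x) : l.countP p = 1 := by
  induction l with
  | nil => simp at hx
  | cons a t ih =>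
    have hnd' := List.nodup_cons.mp hnd
    rcases List.mem_cons.mp hx with rfl | hxt
    · have hpa : p x = true := (h x (List.mem_cons_self ..)).mpr rfl
      have hz : t.countP p = 0 := by
        rw [List.countP_eq_zero]
        intro y hy hpy
        exact hnd'.1 (((h y (List.mem_cons_of_mem _ hy)).mp hpy) ▸ hy)
      rw [List.countP_cons, hz, hpa]
      simp
    · have hax : a ≠ x := fun hax => hnd'.1 (hax ▸ hxt)
      have hpa : p a = false := by
        rcases Bool.eq_false_or_eq_true (p a) with h1 | h0
        · exact absurd ((h a (List.mem_cons_self ..)).mp h1) hax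
        · exact h0
      rw [List.countP_cons, hpa, ih hnd'.2 hxt (fun y hy => h y (List.mem_cons_of_mem _ hy))]
      simp

theorem countP_succ_of (l : List Int) (hnd : l.Nodup) {x : Int} (hx : x ∈ l) {p q : Int → Bool}
    (hagree : ∀ y ∈ l, y ≠ x → q y = p y) (hpx : p x = false) (hqx : q x = true) :
    l.countP q = l.countP p + 1 := by
  induction l with
  | nil => simp at hx
  | cons a t ih =>
    have hnd' := List.nodup_cons.mp hnd
    rcases List.mem_cons.mp hx with rfl | hxt
    · have hz : t.countP q = t.countP p := by
        apply List.countP_congr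
        intro y hy
        rw [hagree y (List.mem_cons_of_mem _ hy) (fun hyx => hnd'.1 (hyx ▸ hy))]
      rw [List.countP_cons, List.countP_cons, hz, hpx, hqx]
      simp
    · have hax : a ≠ x := fun hax => hnd'.1 (hax ▸ hxt)
      have hih := ih hnd'.2 hxt (fun y hy hyx => hagree y (List.mem_cons_of_mem _ hy) hyx)
      rw [List.countP_cons, List.countP_cons, hih, hagree a (List.mem_cons_self ..) hax]
      split <;> omega

theorem countP_nodup_ext {l1 l2 : List Int} (h1 : l1.Nodup) (h2 : l2.Nodup)
    (hm : ∀ a, a ∈ l1 ↔ a ∈ l2) (p : Int → Bool) : l1.countP p = l2.countP p :=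
  ((List.perm_ext_iff_of_nodup h1 h2).mpr hm).countP_eq p

theorem count_concat (p : List Int) (x y : Int) :
    (p ++ [x]).count y = p.count y + (if x = y then 1 else 0) := by
  simp [List.count_append, List.count_cons]

theorem scan_step (p : List Int) (x b bv : Int) (t : Bool) (c : Int) (pr : Option Int)
    (hp : (p ++ [x]).Pairwise (· ≤ ·))
    (h : ScanInv p (b, bv, t, c, pr)) :
    ScanInv (p ++ [x]) (stepB (b, bv, t, c, pr) x) := by
  obtain ⟨l, hlast, hb, hbvmem, hbvcnt, hbvmin, ht, hc, hpr⟩ := h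
  simp only at hb hbvmem hbvcnt hbvmin ht hc hpr
  have hpairp : p.Pairwise (· ≤ ·) := (List.pairwise_append.mp hp).1
  have hlex : ∀ y ∈ p, y ≤ x := by
    intro y hy
    exact (List.pairwise_append.mp hp).2.2 y hy x (List.mem_singleton_self x)
  have hlmem : l ∈ p := List.mem_of_getLast? hlast
  have hlemax : ∀ y ∈ p, y ≤ l := le_getLast p hpairp hlast
  have hbvpos : 0 < p.count bv := List.count_pos_iff.mpr hbvmem
  have hM1 : 1 ≤ Mn p := hbvcnt ▸ hbvpos
  have hcnt : ∀ y, (p ++ [x]).count y = p.count y + (if x = y then 1 else 0) := count_concat p x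
  rcases eq_or_ne x l with rfl | hxl
  · -- x continues the last run
    have hc0le : p.count x ≤ Mn p := count_le_Mn hlmem
    have hcntx : (p ++ [x]).count x = p.count x + 1 := by rw [hcnt x]; simp
    have hcnto : ∀ y, y ≠ x → (p ++ [x]).count y = p.count y := by
      intro y hy; rw [hcnt y]; simp [Ne.symm hy]
    have hmemnew : ∀ y, y ∈ p ++ [x] ↔ y ∈ p := by
      intro y
      constructor
      · intro hy; rcases List.mem_append.mp hy with h0 | h0
        · exact h0
        · rw [List.mem_singleton.mp h0]; exact hlmem
      · intro hy; exact List.mem_append.mpr (Or.inl hy)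
    have hstep : stepB (b, bv, t, c, pr) x =
        (if b < c + 1 then (c + 1, x, false, c + 1, some x)
         else if c + 1 = b ∧ x ≠ bv then (b, bv, true, c + 1, some x)
         else (b, bv, t, c + 1, some x)) := by
      unfold stepB
      rw [hpr]
      simp
    rw [hstep]
    by_cases h1 : p.count x = Mn p
    · -- strict improvement
      have hMnew : Mn (p ++ [x]) = Mn p + 1 := by
        apply Mn_unique
        · intro v hv
          by_cases hvx : v = x
          · subst hvx; omega
          · rw [hcnto v hvx]
            have := count_le_Mn ((hmemnew v).mp hv)
            omega
        · exact ⟨x, List.mem_append.mpr (Or.inr (List.mem_singleton_self x)), by omega⟩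
      rw [if_pos (by rw [hc, hb, h1]; push_cast; omega)]
      refine ⟨x, List.getLast?_concat, ?_, ?_, ?_, ?_, ?_, ?_, rfl⟩
      · show c + 1 = (Mn (p ++ [x]) : Int)
        rw [hc, h1, hMnew]; omega
      · exact List.mem_append.mpr (Or.inr (List.mem_singleton_self x))
      · show (p ++ [x]).count x = Mn (p ++ [x])
        rw [hcntx, hMnew]; omega
      · intro y hy hcy
        show x ≤ y
        by_cases hyx : y = x
        · omega
        · rw [hcnto y hyx, hMnew] at hcy
          have := count_le_Mn ((hmemnew y).mp hy)
          omega
      · show false = decide (2 ≤ (attL (p ++ [x])).length)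
        have hlen : (attL (p ++ [x])).length = 1 := by
          rw [attL_len]
          apply countP_one_of _ (PySem.List.nodup_dedup _)
            ((PySem.List.mem_dedup _ _).mpr (List.mem_append.mpr (Or.inr (List.mem_singleton_self x))))
          intro y hy
          rw [beq_iff_eq, hMnew]
          constructor
          · intro hcy
            by_cases hyx : y = x
            · exact hyx
            · rw [hcnto y hyx] at hcy
              have := count_le_Mn ((hmemnew y).mp ((PySem.List.mem_dedup _ _).mp hy))
              omega
          · intro hyx; subst hyx; omega
        rw [hlen]
        simp
      · show c + 1 = (((p ++ [x]).count x : Nat) : Int)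
        rw [hc, hcntx]; push_cast; omega
    · have hc0lt : p.count x < Mn p := lt_of_le_of_ne hc0le h1
      have hbvx : bv ≠ x := by intro hbx; rw [hbx] at hbvcnt; omega
      have hcntbv : (p ++ [x]).count bv = Mn p := by rw [hcnto bv hbvx]; exact hbvcnt
      have hMnew : Mn (p ++ [x]) = Mn p := by
        apply Mn_unique
        · intro v hv
          by_cases hvx : v = x
          · subst hvx; omega
          · rw [hcnto v hvx]
            exact count_le_Mn ((hmemnew v).mp hv)
        · exact ⟨bv, (hmemnew bv).mpr hbvmem, hcntbv⟩
      by_cases h2 : p.count x + 1 = Mn p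
      · -- the run reaches the current best: tie
        rw [if_neg (by rw [hc, hb]; omega),
            if_pos ⟨by rw [hc, hb]; omega, fun hxbv => hbvx hxbv.symm⟩]
        refine ⟨x, List.getLast?_concat, ?_, ?_, ?_, ?_, ?_, ?_, rfl⟩
        · show b = (Mn (p ++ [x]) : Int)
          rw [hb, hMnew]
        · exact List.mem_append.mpr (Or.inl hbvmem)
        · show (p ++ [x]).count bv = Mn (p ++ [x])
          rw [hcntbv, hMnew]
        · intro y hy hcy
          show bv ≤ y
          by_cases hyx : y = x
          · subst hyx; exact hlex bv hbvmem
          · rw [hcnto y hyx, hMnew] at hcy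
            exact hbvmin y ((hmemnew y).mp hy) hcy
        · show true = decide (2 ≤ (attL (p ++ [x])).length)
          have hN1 : 0 < (PySem.List.dedup p).countP (fun v => p.count v == Mn p) := by
            rw [List.countP_pos_iff]
            exact ⟨bv, (PySem.List.mem_dedup _ _).mpr hbvmem, by rw [beq_iff_eq]; exact hbvcnt⟩
          have hlen : (attL (p ++ [x])).length
              = (PySem.List.dedup p).countP (fun v => p.count v == Mn p) + 1 := by
            rw [attL_len]
            have hs : (PySem.List.dedup (p ++ [x])).countP (fun v => (p ++ [x]).count v == Mn (p ++ [x]))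
                = (PySem.List.dedup (p ++ [x])).countP (fun v => p.count v == Mn p) + 1 := by
              apply countP_succ_of _ (PySem.List.nodup_dedup _)
                ((PySem.List.mem_dedup _ _).mpr (List.mem_append.mpr (Or.inr (List.mem_singleton_self x))))
              · intro y _ hyx
                rw [hcnto y hyx, hMnew]
              · rw [beq_eq_false_iff_ne]; omega
              · rw [beq_iff_eq, hcntx, hMnew]; omega
            have hmm : ∀ a, a ∈ PySem.List.dedup (p ++ [x]) ↔ a ∈ PySem.List.dedup p := fun a =>
              (PySem.List.mem_dedup _ _).trans ((hmemnew a).trans (PySem.List.mem_dedup _ _).symm)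
            rw [hs, countP_nodup_ext (PySem.List.nodup_dedup _) (PySem.List.nodup_dedup _) hmm _]
          rw [hlen]
          symm
          simp only [decide_eq_true_eq]
          omega
        · show c + 1 = (((p ++ [x]).count x : Nat) : Int)
          rw [hc, hcntx]; push_cast; omega
      · -- nothing changes
        rw [if_neg (by rw [hc, hb]; omega),
            if_neg (by rw [hc, hb]; intro hcon; omega)]
        refine ⟨x, List.getLast?_concat, ?_, ?_, ?_, ?_, ?_, ?_, rfl⟩
        · show b = (Mn (p ++ [x]) : Int)
          rw [hb, hMnew]
        · exact List.mem_append.mpr (Or.inl hbvmem)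
        · show (p ++ [x]).count bv = Mn (p ++ [x])
          rw [hcntbv, hMnew]
        · intro y hy hcy
          show bv ≤ y
          by_cases hyx : y = x
          · subst hyx; rw [hcntx, hMnew] at hcy; omega
          · rw [hcnto y hyx, hMnew] at hcy
            exact hbvmin y ((hmemnew y).mp hy) hcy
        · show t = decide (2 ≤ (attL (p ++ [x])).length)
          rw [ht]
          have hlen : (attL (p ++ [x])).length = (attL p).length := by
            rw [attL_len, attL_len]
            have hs : (PySem.List.dedup (p ++ [x])).countP (fun v => (p ++ [x]).count v == Mn (p ++ [x]))
                = (PySem.List.dedup (p ++ [x])).countP (fun v => p.count v == Mn p) := by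
              apply List.countP_congr
              intro y _
              by_cases hyx : y = x
              · subst hyx
                rw [hcntx, hMnew]
                simp only [beq_iff_eq]
                omega
              · rw [hcnto y hyx, hMnew]
            have hmm : ∀ a, a ∈ PySem.List.dedup (p ++ [x]) ↔ a ∈ PySem.List.dedup p := fun a =>
              (PySem.List.mem_dedup _ _).trans ((hmemnew a).trans (PySem.List.mem_dedup _ _).symm)
            rw [hs, countP_nodup_ext (PySem.List.nodup_dedup _) (PySem.List.nodup_dedup _) hmm _]
          rw [hlen]
        · show c + 1 = (((p ++ [x]).count x : Nat) : Int)
          rw [hc, hcntx]; push_cast; omega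
  · -- x starts a new run (x is strictly greater than everything in p)
    have hxnp : x ∉ p := by
      intro hxp
      exact hxl (le_antisymm (hlemax x hxp) (hlex l hlmem))
    have hcntx : (p ++ [x]).count x = 1 := by
      rw [hcnt x, List.count_eq_zero.mpr hxnp]; simp
    have hcnto : ∀ y, y ≠ x → (p ++ [x]).count y = p.count y := by
      intro y hy; rw [hcnt y]; simp [Ne.symm hy]
    have hbvx : bv ≠ x := fun hbx => hxnp (hbx ▸ hbvmem)
    have hcntbv : (p ++ [x]).count bv = Mn p := by rw [hcnto bv hbvx]; exact hbvcnt
    have hddn : ((PySem.List.dedup p) ++ [x]).Nodup := by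
      rw [List.nodup_append]
      refine ⟨PySem.List.nodup_dedup _, List.nodup_singleton x, ?_⟩
      intro a ha bb hbb
      rw [List.mem_singleton] at hbb
      subst hbb
      exact fun hab => hxnp (hab ▸ (PySem.List.mem_dedup _ _).mp ha)
    have hddm : ∀ a, a ∈ PySem.List.dedup (p ++ [x]) ↔ a ∈ (PySem.List.dedup p) ++ [x] := by
      intro a
      rw [PySem.List.mem_dedup, List.mem_append, List.mem_append, PySem.List.mem_dedup]
    have hsplit : ∀ q : Int → Bool, (PySem.List.dedup (p ++ [x])).countP q
        = (PySem.List.dedup p).countP q + (if q x then 1 else 0) := by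
      intro q
      rw [countP_nodup_ext (PySem.List.nodup_dedup _) hddn hddm q, List.countP_append]
      simp [List.countP_cons]
    have hMnew : Mn (p ++ [x]) = Mn p := by
      apply Mn_unique
      · intro v hv
        by_cases hvx : v = x
        · subst hvx; omega
        · rw [hcnto v hvx]
          rcases List.mem_append.mp hv with h0 | h0
          · exact count_le_Mn h0
          · exact absurd (List.mem_singleton.mp h0) hvx
      · exact ⟨bv, List.mem_append.mpr (Or.inl hbvmem), hcntbv⟩
    have hstep : stepB (b, bv, t, c, pr) x =
        (if b < 1 then (1, x, false, 1, some x)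
         else if (1 : Int) = b ∧ x ≠ bv then (b, bv, true, 1, some x)
         else (b, bv, t, 1, some x)) := by
      unfold stepB
      rw [hpr]
      simp [hxl]
    rw [hstep, if_neg (by rw [hb]; omega)]
    by_cases hM : Mn p = 1
    · -- a fresh value ties the best count 1
      rw [if_pos ⟨by rw [hb, hM]; norm_num, fun hxbv => hbvx hxbv.symm⟩]
      refine ⟨x, List.getLast?_concat, ?_, ?_, ?_, ?_, ?_, ?_, rfl⟩
      · show b = (Mn (p ++ [x]) : Int)
        rw [hb, hMnew]
      · exact List.mem_append.mpr (Or.inl hbvmem)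
      · show (p ++ [x]).count bv = Mn (p ++ [x])
        rw [hcntbv, hMnew]
      · intro y hy hcy
        show bv ≤ y
        by_cases hyx : y = x
        · subst hyx; exact hlex bv hbvmem
        · rcases List.mem_append.mp hy with h0 | h0
          · rw [hcnto y hyx, hMnew] at hcy
            exact hbvmin y h0 hcy
          · exact absurd (List.mem_singleton.mp h0) hyx
      · show true = decide (2 ≤ (attL (p ++ [x])).length)
        have hN1 : 0 < (PySem.List.dedup p).countP (fun v => p.count v == Mn p) := by
          rw [List.countP_pos_iff]
          exact ⟨bv, (PySem.List.mem_dedup _ _).mpr hbvmem, by rw [beq_iff_eq]; exact hbvcnt⟩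
        have hlen : (attL (p ++ [x])).length
            = (PySem.List.dedup p).countP (fun v => p.count v == Mn p) + 1 := by
          rw [attL_len, hsplit]
          have hqx : ((p ++ [x]).count x == Mn (p ++ [x])) = true := by
            rw [beq_iff_eq, hcntx, hMnew, hM]
          rw [hqx]
          simp only [if_true]
          congr 1
          apply List.countP_congr
          intro y hy
          rw [hcnto y (fun hyx => hxnp (hyx ▸ (PySem.List.mem_dedup _ _).mp hy)), hMnew]
        rw [hlen]
        symm
        simp only [decide_eq_true_eq]
        omega
      · show (1 : Int) = (((p ++ [x]).count x : Nat) : Int)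
        rw [hcntx]; simp
    · -- best count at least 2: a fresh value changes nothing
      rw [if_neg (by rw [hb]; intro hcon; have := hcon.1; push_cast at this; omega)]
      refine ⟨x, List.getLast?_concat, ?_, ?_, ?_, ?_, ?_, ?_, rfl⟩
      · show b = (Mn (p ++ [x]) : Int)
        rw [hb, hMnew]
      · exact List.mem_append.mpr (Or.inl hbvmem)
      · show (p ++ [x]).count bv = Mn (p ++ [x])
        rw [hcntbv, hMnew]
      · intro y hy hcy
        show bv ≤ y
        by_cases hyx : y = x
        · subst hyx; rw [hcntx, hMnew] at hcy; omega
        · rcases List.mem_append.mp hy with h0 | h0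
          · rw [hcnto y hyx, hMnew] at hcy
            exact hbvmin y h0 hcy
          · exact absurd (List.mem_singleton.mp h0) hyx
      · show t = decide (2 ≤ (attL (p ++ [x])).length)
        rw [ht]
        have hlen : (attL (p ++ [x])).length = (attL p).length := by
          rw [attL_len, attL_len, hsplit]
          have hqx : ((p ++ [x]).count x == Mn (p ++ [x])) = false := by
            rw [beq_eq_false_iff_ne, hcntx, hMnew]
            omega
          rw [hqx]
          simp only [Bool.false_eq_true, if_false, Nat.add_zero]
          apply List.countP_congr
          intro y hy
          rw [hcnto y (fun hyx => hxnp (hyx ▸ (PySem.List.mem_dedup _ _).mp hy)), hMnew]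
        rw [hlen]
      · show (1 : Int) = (((p ++ [x]).count x : Nat) : Int)
        rw [hcntx]; simp

theorem scan_inv : ∀ (p : List Int), p.Pairwise (· ≤ ·) → p ≠ [] →
    ScanInv p (p.foldl stepB (0, -1, false, 0, none)) := by
  intro p
  induction p using List.reverseRecOn with
  | nil => intro _ h; exact absurd rfl h
  | append_singleton p x ih =>
    intro hp _
    rw [List.foldl_append, List.foldl_cons, List.foldl_nil]
    rcases eq_or_ne p [] with rfl | hpne
    · -- first element
      rw [List.nil_append, List.foldl_nil]
      have hstepb : stepB (0, -1, false, 0, none) x = (1, x, false, 1, some x) := by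
        unfold stepB
        norm_num
      have hM : Mn [x] = 1 := by simp [Mn]
      have hatt : attL [x] = [x] := by
        have hof : PySem.Set.ofList [x] = [x] := rfl
        simp [attL, hM, hof, List.count_singleton]
      rw [hstepb]
      refine ⟨x, rfl, ?_, ?_, ?_, ?_, ?_, ?_, rfl⟩
      · simp only; rw [hM]; simp
      · simp
      · simp only; rw [hM]; simp
      · simp only
        intro y hy _
        rw [List.mem_singleton.mp hy]
      · simp only; rw [hatt]; simp
      · simp
    · have hinv := ih (List.pairwise_append.mp hp).1 hpne
      have := scan_step p x _ _ _ _ _ hp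
        (by exact hinv)
      exact this

theorem attL_perm_length {xs ys : List Int} (h : xs.Perm ys) :
    (attL xs).length = (attL ys).length := by
  rw [attL_len, attL_len]
  have hmm : ∀ a, a ∈ PySem.List.dedup xs ↔ a ∈ PySem.List.dedup ys := fun a =>
    (PySem.List.mem_dedup _ _).trans (h.mem_iff.trans (PySem.List.mem_dedup _ _).symm)
  rw [countP_nodup_ext (PySem.List.nodup_dedup _) (PySem.List.nodup_dedup _) hmm _]
  apply List.countP_congr
  intro a _
  rw [h.count_eq, Mn_perm h]

theorem max?_counts (array : List Int) (h : array ≠ []) :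
    PySem.List.max? ((PySem.Set.ofList array).map (fun k => ((array.count k : Nat) : Int)))
      (fun v => v) = some ((Mn array : Nat) : Int) := by
  obtain ⟨v, hv, hveq⟩ := Mn_attained h
  have hmemL : ((Mn array : Nat) : Int)
      ∈ (PySem.Set.ofList array).map (fun k => ((array.count k : Nat) : Int)) := by
    rw [List.mem_map]
    exact ⟨v, (PySem.Set.mem_ofList _ _).mpr hv, by rw [hveq]⟩
  cases hmax : PySem.List.max?
      ((PySem.Set.ofList array).map (fun k => ((array.count k : Nat) : Int))) (fun v => v) with
  | none =>
    rw [PySem.List.max?_eq_none_iff] at hmax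
    rw [hmax] at hmemL
    simp at hmemL
  | some m =>
    have hm_mem := PySem.List.max?_mem hmax
    have hmax_le := PySem.List.max?_isMax hmax
    have h1 : ((Mn array : Nat) : Int) ≤ m := hmax_le _ hmemL
    have h2 : m ≤ ((Mn array : Nat) : Int) := by
      rw [List.mem_map] at hm_mem
      obtain ⟨k, hk, hkeq⟩ := hm_mem
      rw [← hkeq]
      have := count_le_Mn ((PySem.Set.mem_ofList _ _).mp hk)
      exact_mod_cast this
    rw [le_antisymm h2 h1]

theorem solution_closed (array : List Int) (h : array ≠ []) :
    solution array = if 1 < (attL array).length then -1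
      else (PySem.List.pyGet? (attL array) 0).getD 0 := by
  unfold solution
  simp only [PySem.Dict.values, PySem.Dict.items_counter, List.map_map]
  have hmax := max?_counts array h
  simp only [Function.comp_def] at hmax ⊢
  simp only [hmax]
  have harr : ((PySem.Set.ofList array).map (fun k => (k, ((array.count k : Nat) : Int)))).filter
        (fun kv => ((Mn array : Nat) : Int) == kv.2)
      = (attL array).map (fun k => (k, ((array.count k : Nat) : Int))) := by
    rw [List.filter_map]
    unfold attL
    rw [PySem.List.dedup_eq_ofList]
    congr 1
    apply List.filter_congr
    intro k _
    simp only [Function.comp_def]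
    rw [Bool.eq_iff_iff, beq_iff_eq, beq_iff_eq]
    omega
  rw [harr, List.map_map]
  rw [show ((fun kv => kv.1) ∘ (fun k => (k, ((array.count k : Nat) : Int)))) = fun (k : Int) => k
      from funext (fun k => rfl)]
  rw [List.map_id']

-- ===== VERDICT (by name: the statement is the Claim_ definition above) =====
theorem solution_spec : Claim_equal_solution := by
  intro array _ hpre
  unfold Spec_solution
  have hperm : (PySem.List.sorted array (fun x => x) false).Perm array :=
    PySem.List.sorted_perm array (fun x => x) false
  have hsne : PySem.List.sorted array (fun x => x) false ≠ [] := by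
    intro h0
    exact hpre ((PySem.List.sorted_eq_nil_iff _ _ _).mp h0)
  have hpair : (PySem.List.sorted array (fun x => x) false).Pairwise (· ≤ ·) := by
    have := PySem.List.sorted_pairwise (xs := array) (key := fun x => x)
    simpa using this
  obtain ⟨l, hlast, hb, hbvmem, hbvcnt, hbvmin, ht, hc, hpr⟩ := scan_inv _ hpair hsne
  rw [solution_closed array hpre]
  unfold solution_alt
  simp only
  rw [ht]
  have hlen : (attL (PySem.List.sorted array (fun x => x) false)).length = (attL array).length :=
    attL_perm_length hperm
  rw [hlen]
  by_cases htie : 2 ≤ (attL array).length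
  · have h1 : 1 < (attL array).length := by omega
    have h2 : decide (2 ≤ (attL array).length) = true := by simpa using htie
    rw [if_pos h1, if_pos h2]
  · have h1 : ¬ 1 < (attL array).length := by omega
    have h2 : ¬ decide (2 ≤ (attL array).length) = true := by simpa using htie
    rw [if_neg h1, if_neg h2]
    obtain ⟨v, hv, hveq⟩ := Mn_attained hpre
    have hvmem : v ∈ attL array := mem_attL.mpr ⟨hv, hveq⟩
    have hlen1 : (attL array).length = 1 := by
      have := List.length_pos_of_mem hvmem
      omega
    obtain ⟨k, hk⟩ := List.length_eq_one_iff.mp hlen1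
    have hbvatt : (PySem.List.sorted array (fun x => x) false).foldl stepB
        (0, -1, false, 0, none) |>.2.1 ∈ attL array := by
      apply mem_attL.mpr
      refine ⟨hperm.mem_iff.mp hbvmem, ?_⟩
      rw [← hperm.count_eq, ← Mn_perm hperm]
      exact hbvcnt
    rw [hk] at hbvatt
    rw [hk]
    simp only [PySem.List.pyGet?]
    rw [List.mem_singleton.mp hbvatt]
    rfl
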